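-- pv_equiv track=rewrite | github.com/PaulNGilson/AoC_2024 | day6/guard_walk.py | next_visit
-- ===== SOURCE A (Python) =====
-- def next_visit(orientation, obstacle_indices, current_index):
--     """
--     orientation is "normal" or "reverse"
--     obstacle indicies is one of hori or vert dictionaries
--     """
--     next_index = None
--     if orientation == "normal":
--         for obstacle_index in obstacle_indices:
--             if obstacle_index > current_index:
--                 next_index = obstacle_index-1
--                 break
--     else: # orientation == "reverse"
--         for obstacle_index in reversed(obstacle_indices):
--             if obstacle_index < current_index:
--                 next_index = obstacle_index+1
--                 break
--     return next_index
-- ===== SOURCE B (Python) =====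
-- def next_visit(orientation, obstacle_indices, current_index):
--     # One uniform forward fold: keep the FIRST match (> current) for "normal",
--     # the LAST match (< current) otherwise (= first match of the reversed scan).
--     ans = None
--     for x in obstacle_indices:
--         if orientation == "normal":
--             if ans is None and x > current_index:
--                 ans = x - 1
--         else:
--             if x < current_index:
--                 ans = x + 1
--     return ans
-- ===== Notes on version B (the rewrite author's own statement) =====
-- stated objective: alternative
-- what changed: B replaces A's two orientation-specific break loops (one of them over reversed(list)) by a single uniform forward fold with an accumulator that keeps the first match for 'normal' and the last match for 'reverse'.
import Mathlib
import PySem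

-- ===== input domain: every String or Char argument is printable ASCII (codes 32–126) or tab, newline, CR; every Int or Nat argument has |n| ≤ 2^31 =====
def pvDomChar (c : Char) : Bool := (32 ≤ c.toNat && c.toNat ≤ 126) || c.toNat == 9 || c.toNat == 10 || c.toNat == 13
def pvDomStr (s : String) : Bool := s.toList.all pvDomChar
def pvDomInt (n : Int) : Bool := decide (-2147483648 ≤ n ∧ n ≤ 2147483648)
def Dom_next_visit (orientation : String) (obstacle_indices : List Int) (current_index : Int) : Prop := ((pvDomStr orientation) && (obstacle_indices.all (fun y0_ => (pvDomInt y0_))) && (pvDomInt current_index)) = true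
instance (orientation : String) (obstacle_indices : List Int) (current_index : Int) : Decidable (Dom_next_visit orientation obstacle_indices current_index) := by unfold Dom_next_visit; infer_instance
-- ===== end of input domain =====

-- B replaces A's two orientation-specific break loops (one over reversed(list)) by a single
-- uniform forward fold with an accumulator; same O(n) cost, different traversal (alternative).


-- ===== PORT A =====
-- A's "normal" loop: first obstacle > current, break with obstacle-1
def nvLoopN (c : Int) : List Int → Option Int
  | [] => none
  | x :: xs => if x > c then some (x - 1) else nvLoopN c xs

-- A's "reverse" loop (run over reversed(obstacle_indices)): first obstacle < current, break with obstacle+1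
def nvLoopR (c : Int) : List Int → Option Int
  | [] => none
  | x :: xs => if x < c then some (x + 1) else nvLoopR c xs

def next_visit (orientation : String) (obstacle_indices : List Int) (current_index : Int) : Option Int :=
  if orientation = "normal" then nvLoopN current_index obstacle_indices
  else nvLoopR current_index obstacle_indices.reverse

-- ===== PORT B =====
-- B's single loop body: keep first match for "normal", last match otherwise
def nvStep (orientation : String) (c : Int) (ans : Option Int) (x : Int) : Option Int :=
  if orientation = "normal" then
    if ans = none ∧ x > c then some (x - 1) else ans
  else
    if x < c then some (x + 1) else ans

def next_visit_alt (orientation : String) (obstacle_indices : List Int) (current_index : Int) : Option Int :=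
  obstacle_indices.foldl (nvStep orientation current_index) none

-- ===== PRECONDITION & SPEC =====
def Spec_next_visit (orientation : String) (obstacle_indices : List Int) (current_index : Int) (out : Option Int) : Prop := out = next_visit_alt orientation obstacle_indices current_index
instance (orientation : String) (obstacle_indices : List Int) (current_index : Int) (out : Option Int) : Decidable (Spec_next_visit orientation obstacle_indices current_index out) := by unfold Spec_next_visit; infer_instance

-- ===== CLAIM (what is proved, stated in full; the proofs are below) =====
def Claim_equal_next_visit : Prop := ∀ (orientation : String) (obstacle_indices : List Int) (current_index : Int), Dom_next_visit orientation obstacle_indices current_index → Spec_next_visit orientation obstacle_indices current_index (next_visit orientation obstacle_indices current_index)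

-- ===== LEMMAS AND PROOFS =====

-- "normal": once the accumulator is some, the fold keeps it
lemma foldl_step_normal_some (c a : Int) (xs : List Int) :
    xs.foldl (nvStep "normal" c) (some a) = some a := by
  induction xs with
  | nil => rfl
  | cons x xs ih => simpa [nvStep] using ih

-- "normal": the fold from none computes A's first-match loop
lemma foldl_step_normal (c : Int) (xs : List Int) :
    xs.foldl (nvStep "normal" c) none = nvLoopN c xs := by
  induction xs with
  | nil => rfl
  | cons x xs ih =>
    by_cases h : x > c
    · simp [nvStep, nvLoopN, h, foldl_step_normal_some]
    · simpa [nvStep, nvLoopN, h] using ih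

-- reverse loop on l ++ [x]: the appended element is the fallback
lemma nvLoopR_append (c x : Int) (l : List Int) :
    nvLoopR c (l ++ [x]) = (nvLoopR c l).or (if x < c then some (x + 1) else none) := by
  induction l with
  | nil => by_cases h : x < c <;> simp [nvLoopR, h]
  | cons y l ih =>
    by_cases h : y < c <;> simp [nvLoopR, h, ih]

-- non-"normal": the forward fold from acc computes A's reversed-scan loop, with acc as fallback
lemma foldl_step_rev (o : String) (ho : ¬ o = "normal") (c : Int) (xs : List Int) (acc : Option Int) :
    xs.foldl (nvStep o c) acc = (nvLoopR c xs.reverse).or acc := by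
  induction xs generalizing acc with
  | nil => rfl
  | cons x xs ih =>
    rw [List.foldl_cons, ih, List.reverse_cons, nvLoopR_append]
    by_cases h : x < c <;> simp [nvStep, ho, h]

-- ===== VERDICT (by name: the statement is the Claim_ definition above) =====
theorem next_visit_spec : Claim_equal_next_visit := by
  intro o xs c _
  unfold Spec_next_visit next_visit next_visit_alt
  by_cases h : o = "normal"
  · simp [h, foldl_step_normal]
  · simp [h, foldl_step_rev o h c xs none]
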